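-- pv_equiv track=rewrite | github.com/Ron02/Chess_Game | chessAI/minMax.py | calcBoard
-- ===== SOURCE A (Python) =====
-- def calcBoard (b):
-- 	ret = ""
-- 	temp = 0
-- 	for i in range(len(b)):
-- 		if (b[i].isdigit()):
-- 			temp = temp + 1
-- 			if (i == len(b) - 1):
-- 				ret += str(temp)
-- 		else:
-- 			if (temp != 0):
-- 				ret += str(temp)
-- 				temp = 0
-- 			ret += b[i]
-- 	return ret
-- ===== SOURCE B (Python) =====
-- from itertools import groupby
--
-- def calcBoard(b):
--     parts = []
--     for is_digit, grp in groupby(b, key=str.isdigit):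
--         chars = list(grp)
--         parts.append(str(len(chars)) if is_digit else ''.join(chars))
--     return ''.join(parts)
-- ===== Notes on version B (the rewrite author's own statement) =====
-- stated objective: idiomatic
-- what changed: Replaced the per-index counter with a last-element guard by an itertools.groupby split into maximal digit/non-digit runs, emitting each run's length or text.
import Mathlib
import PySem

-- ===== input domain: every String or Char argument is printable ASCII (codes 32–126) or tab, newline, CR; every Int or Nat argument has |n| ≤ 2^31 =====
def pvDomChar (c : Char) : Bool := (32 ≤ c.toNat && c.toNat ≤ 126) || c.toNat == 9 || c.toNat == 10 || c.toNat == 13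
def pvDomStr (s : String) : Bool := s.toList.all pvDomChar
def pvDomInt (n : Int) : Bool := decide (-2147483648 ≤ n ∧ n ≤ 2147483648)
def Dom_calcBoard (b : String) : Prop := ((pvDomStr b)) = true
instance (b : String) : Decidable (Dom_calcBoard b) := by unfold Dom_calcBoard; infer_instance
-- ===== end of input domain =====

set_option maxRecDepth 4000


-- B replaces A's per-index counter-with-last-element-guard by a groupby split into
-- maximal digit/non-digit runs (objective: idiomatic; same O(n) cost).

-- ===== PORT A =====
-- literal transliteration of A's index loop; the (ret, temp) state is carried by a fold
-- over range(len(b)); strings are handled as List Char (PySem.Chars is exact on this domain)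
def calcBoardStep (cs : List Char) (acc : List Char × Int) (i : Int) : List Char × Int :=
  let c := PySem.List.pyGetD cs i ' '
  if PySem.Chars.isdigit c then
    let temp := acc.2 + 1
    if i = (cs.length : Int) - 1 then (acc.1 ++ (PySem.Int.toStr temp).toList, temp)
    else (acc.1, temp)
  else
    let acc := if acc.2 ≠ 0 then (acc.1 ++ (PySem.Int.toStr acc.2).toList, (0 : Int)) else acc
    (acc.1 ++ [c], acc.2)

def calcBoard (b : String) : String :=
  String.mk ((PySem.List.pyRange 0 b.toList.length 1).foldl (calcBoardStep b.toList) ([], 0)).1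

-- ===== PORT B =====
-- transliteration of Source B: groupby(b, key=str.isdigit) = peel off the maximal run whose
-- key equals the head's key, emit str(len(run)) or the run itself, recurse on the rest
def calcRuns : List Char → List Char
  | [] => []
  | c :: cs =>
    let run := cs.takeWhile (fun d => PySem.Chars.isdigit d == PySem.Chars.isdigit c)
    let rest := cs.dropWhile (fun d => PySem.Chars.isdigit d == PySem.Chars.isdigit c)
    (if PySem.Chars.isdigit c then (PySem.Int.toStr (1 + run.length)).toList else c :: run)
      ++ calcRuns rest
termination_by l => l.length
decreasing_by
  exact Nat.lt_succ_of_le (List.length_dropWhile_le _ _)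

def calcBoard_alt (b : String) : String :=
  String.mk (calcRuns b.toList)

-- ===== PRECONDITION & SPEC =====
def Spec_calcBoard (b : String) (out : String) : Prop := out = calcBoard_alt b
instance (b : String) (out : String) : Decidable (Spec_calcBoard b out) := by unfold Spec_calcBoard; infer_instance

-- ===== CLAIM (what is proved, stated in full; the proofs are below) =====
def Claim_equal_calcBoard : Prop := ∀ (b : String), Dom_calcBoard b → Spec_calcBoard b (calcBoard b)

-- ===== LEMMAS AND PROOFS =====

-- reference recursion characterising A's loop on the remaining suffix with pending count temp
def refA : List Char → Int → List Char
  | [], _ => []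
  | c :: cs, temp =>
    if PySem.Chars.isdigit c then
      if cs = [] then (PySem.Int.toStr (temp + 1)).toList else refA cs (temp + 1)
    else (if temp ≠ 0 then (PySem.Int.toStr temp).toList else []) ++ c :: refA cs 0

lemma refA_nil (temp : Int) : refA [] temp = [] := rfl

lemma refA_cons_digit {c : Char} (cs : List Char) (temp : Int)
    (hd : PySem.Chars.isdigit c = true) (hcs : cs ≠ []) :
    refA (c :: cs) temp = refA cs (temp + 1) := by
  simp [refA, hd, hcs]

lemma refA_singleton_digit {c : Char} (temp : Int) (hd : PySem.Chars.isdigit c = true) :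
    refA [c] temp = (PySem.Int.toStr (temp + 1)).toList := by
  simp [refA, hd]

lemma refA_cons_nondigit {c : Char} (cs : List Char) (temp : Int)
    (hd : PySem.Chars.isdigit c = false) :
    refA (c :: cs) temp
      = (if temp ≠ 0 then (PySem.Int.toStr temp).toList else []) ++ c :: refA cs 0 := by
  simp [refA, hd]

lemma foldA_eq (cs : List Char) : ∀ (k j : Nat), j + k = cs.length →
    ∀ (ret : List Char) (temp : Int),
    ((PySem.List.pyRange (j : Int) (cs.length : Int) 1).foldl (calcBoardStep cs) (ret, temp)).1
      = ret ++ refA (cs.drop j) temp := by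
  intro k
  induction k with
  | zero =>
      intro j hj ret temp
      have hje : j = cs.length := by omega
      subst hje
      rw [PySem.List.pyRange_one_eq_nil (by omega)]
      simp [List.drop_length, refA_nil]
  | succ k ih =>
      intro j hj ret temp
      have hjlt : j < cs.length := by omega
      rw [PySem.List.pyRange_one_cons (by exact_mod_cast hjlt)]
      have hdrop : cs.drop j = cs[j] :: cs.drop (j + 1) :=
        List.drop_eq_getElem_cons hjlt
      have hget : PySem.List.pyGetD cs (j : Int) ' ' = cs[j] := by
        simp [PySem.List.pyGetD_natCast, List.getElem?_eq_getElem hjlt]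
      have hpush : ((j : Int) + 1) = ((j + 1 : Nat) : Int) := by push_cast; ring
      rw [List.foldl_cons]
      by_cases hd : PySem.Chars.isdigit cs[j]
      · by_cases hlast : (j : Int) = (cs.length : Int) - 1
        · have hjn : j + 1 = cs.length := by omega
          have hnil : cs.drop (j + 1) = [] := List.drop_of_length_le (by omega)
          simp only [calcBoardStep, hget, hd, if_pos hlast, if_true, hpush]
          rw [ih (j + 1) (by omega) _ _]
          rw [hdrop, hnil, refA_nil, refA_singleton_digit temp hd]
          simp
        · have hne : cs.drop (j + 1) ≠ [] := by
            intro h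
            have := List.drop_eq_nil_iff.mp h
            omega
          simp only [calcBoardStep, hget, hd, if_neg hlast, if_true, hpush]
          rw [ih (j + 1) (by omega) _ _]
          rw [hdrop, refA_cons_digit _ temp hd hne]
      · have hd' : PySem.Chars.isdigit cs[j] = false := by simpa using hd
        simp only [calcBoardStep, hget, hd', Bool.false_eq_true, if_false, hpush]
        rw [hdrop, refA_cons_nondigit _ temp hd']
        by_cases ht : temp ≠ 0
        · simp only [if_pos ht]
          rw [ih (j + 1) (by omega) _ _]
          simp
        · simp only [if_neg ht]
          rw [ih (j + 1) (by omega) _ _]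
          have ht0 : temp = 0 := by omega
          simp [ht0]

-- consuming a digit run just adds its length to the pending count (rest nonempty)
lemma refA_digits_append (ds : List Char) (h : ∀ d ∈ ds, PySem.Chars.isdigit d = true) :
    ∀ (x : Char) (t : List Char) (temp : Int),
    refA (ds ++ x :: t) temp = refA (x :: t) (temp + ds.length) := by
  induction ds with
  | nil => intro x t temp; simp
  | cons d ds ih =>
      intro x t temp
      have hd := h d (by simp)
      rw [List.cons_append, refA_cons_digit _ temp hd (by simp)]
      rw [ih (fun d hd => h d (by simp [hd])) x t (temp + 1)]
      congr 1
      simp only [List.length_cons]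
      push_cast
      omega

-- a trailing all-digit run flushes as its total count
lemma refA_digits_nil (ds : List Char) (h : ∀ d ∈ ds, PySem.Chars.isdigit d = true)
    (hne : ds ≠ []) : ∀ temp, refA ds temp = (PySem.Int.toStr (temp + ds.length)).toList := by
  induction ds with
  | nil => exact absurd rfl hne
  | cons d ds ih =>
      intro temp
      have hd := h d (by simp)
      by_cases h0 : ds = []
      · subst h0
        rw [refA_singleton_digit temp hd]
        simp
      · rw [refA_cons_digit _ temp hd h0]
        rw [ih (fun d hd => h d (by simp [hd])) h0 (temp + 1)]
        congr 2
        simp only [List.length_cons]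
        push_cast
        omega

-- a non-digit run with no pending count passes through unchanged
lemma refA_nondigits_append (run : List Char)
    (h : ∀ d ∈ run, PySem.Chars.isdigit d = false) :
    ∀ rest, refA (run ++ rest) 0 = run ++ refA rest 0 := by
  induction run with
  | nil => intro rest; simp
  | cons c run ih =>
      intro rest
      have hc := h c (by simp)
      rw [List.cons_append, refA_cons_nondigit _ 0 hc]
      rw [ih (fun d hd => h d (by simp [hd])) rest]
      simp

-- flushing a nonzero pending count before a non-digit character
lemma refA_flush (x : Char) (t : List Char) (temp : Int)
    (hx : PySem.Chars.isdigit x = false) (ht : temp ≠ 0) :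
    refA (x :: t) temp = (PySem.Int.toStr temp).toList ++ refA (x :: t) 0 := by
  rw [refA_cons_nondigit _ temp hx, refA_cons_nondigit _ 0 hx]
  simp [ht]

lemma dropWhile_head_false {p : Char → Bool} :
    ∀ (l : List Char) (x : Char) (t : List Char), l.dropWhile p = x :: t → p x = false := by
  intro l
  induction l with
  | nil => intro x t h; simp at h
  | cons a l ih =>
      intro x t h
      by_cases hpa : p a
      · rw [List.dropWhile_cons_of_pos hpa] at h
        exact ih x t h
      · rw [List.dropWhile_cons_of_neg hpa] at h
        cases h
        simpa using hpa

lemma calcRuns_eq_refA : ∀ (n : Nat) (cs : List Char), cs.length ≤ n →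
    calcRuns cs = refA cs 0 := by
  intro n
  induction n with
  | zero =>
      intro cs h
      have : cs = [] := List.eq_nil_of_length_eq_zero (by omega)
      subst this
      simp [calcRuns, refA_nil]
  | succ n ih =>
      intro cs h
      match cs with
      | [] => simp [calcRuns, refA_nil]
      | c :: cs =>
        rw [calcRuns]
        set p := fun d => PySem.Chars.isdigit d == PySem.Chars.isdigit c with hp
        have hsplit : cs = cs.takeWhile p ++ cs.dropWhile p :=
          (List.takeWhile_append_dropWhile).symm
        have hrest : (cs.dropWhile p).length ≤ n := by
          have := List.length_dropWhile_le p cs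
          simp at h; omega
        have hrun : ∀ d ∈ cs.takeWhile p, PySem.Chars.isdigit d = PySem.Chars.isdigit c := by
          intro d hd
          have := List.mem_takeWhile_imp hd
          simpa [hp] using this
        by_cases hc : PySem.Chars.isdigit c
        · -- digit run
          have hds : ∀ d ∈ c :: cs.takeWhile p, PySem.Chars.isdigit d = true := by
            intro d hd
            rcases List.mem_cons.mp hd with h1 | h1
            · subst h1; exact hc
            · rw [hrun d h1]; exact hc
          match hrest2 : cs.dropWhile p with
          | [] =>
              have hcs : cs = cs.takeWhile p := by
                conv_lhs => rw [hsplit]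
                simp [hrest2]
              rw [if_pos hc]
              conv_rhs => rw [hcs]
              rw [refA_digits_nil (c :: cs.takeWhile p) hds (by simp) 0]
              rw [show calcRuns [] = [] from by simp [calcRuns]]
              simp only [List.length_cons, List.append_nil]
              congr 2
              push_cast
              omega
          | x :: t =>
              have hx : PySem.Chars.isdigit x = false := by
                have := dropWhile_head_false cs x t hrest2
                simpa [hp, hc] using this
              conv_rhs => rw [hsplit, hrest2]
              rw [show c :: (cs.takeWhile p ++ x :: t) = (c :: cs.takeWhile p) ++ x :: t by simp]
              rw [refA_digits_append (c :: cs.takeWhile p) hds x t 0]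
              rw [refA_flush x t _ hx (by simp; omega)]
              rw [if_pos hc, ← ih (x :: t) (by rw [hrest2] at hrest; exact hrest)]
              congr 3
              simp only [List.length_cons]
              push_cast
              omega
        · -- non-digit run
          have hnd : ∀ d ∈ c :: cs.takeWhile p, PySem.Chars.isdigit d = false := by
            intro d hd
            rcases List.mem_cons.mp hd with h1 | h1
            · subst h1; simpa using hc
            · rw [hrun d h1]; simpa using hc
          conv_rhs => rw [hsplit]
          rw [show c :: (cs.takeWhile p ++ cs.dropWhile p)
                = (c :: cs.takeWhile p) ++ cs.dropWhile p by simp]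
          rw [refA_nondigits_append (c :: cs.takeWhile p) hnd (cs.dropWhile p)]
          rw [if_neg hc, ih (cs.dropWhile p) hrest]

-- ===== VERDICT (by name: the statement is the Claim_ definition above) =====
theorem calcBoard_spec : Claim_equal_calcBoard := by
  intro b _
  unfold Spec_calcBoard calcBoard calcBoard_alt
  rw [calcRuns_eq_refA b.toList.length b.toList (le_refl _)]
  have := foldA_eq b.toList b.toList.length 0 (by omega) [] 0
  simp only [Nat.cast_zero] at this
  rw [this]
  simp
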